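-- pv_equiv track=rewrite | github.com/Puzikovv/python_labs_km14_puzikov | p11_puzikov/p11_puzikov_1.py | rrange
-- ===== SOURCE A (Python) =====
-- def rrange(begin,end,step = 1):
--   if(begin == end):
--     return []
--   if(begin < end and step < 0):
--     return []
--   if(begin > end and step > 0):
--     return []
--   ans = [begin]
--   if(abs(begin + step - end) < abs(begin - end)):
--     ans.extend(rrange(begin+step,end,step))
--   return ans;
-- ===== SOURCE B (Python) =====
-- def rrange(begin, end, step=1):
--     if begin == end:
--         return []
--     if step == 0:
--         return [begin]
--     if (end > begin) != (step > 0):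
--         return []
--     n = -((begin - end) // step)  # ceil((end - begin) / step), >= 1 here
--     return [begin + k * step for k in range(n)]
-- ===== Notes on version B (the rewrite author's own statement) =====
-- stated objective: simpler
-- what changed: Replaced A's one-element-per-call recursion (with an abs-distance shrink test) by a closed-form element count n = ceil((end-begin)/step) via floor division and a single list comprehension over range(n); step == 0 handled as an explicit singleton case.
import Mathlib
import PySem

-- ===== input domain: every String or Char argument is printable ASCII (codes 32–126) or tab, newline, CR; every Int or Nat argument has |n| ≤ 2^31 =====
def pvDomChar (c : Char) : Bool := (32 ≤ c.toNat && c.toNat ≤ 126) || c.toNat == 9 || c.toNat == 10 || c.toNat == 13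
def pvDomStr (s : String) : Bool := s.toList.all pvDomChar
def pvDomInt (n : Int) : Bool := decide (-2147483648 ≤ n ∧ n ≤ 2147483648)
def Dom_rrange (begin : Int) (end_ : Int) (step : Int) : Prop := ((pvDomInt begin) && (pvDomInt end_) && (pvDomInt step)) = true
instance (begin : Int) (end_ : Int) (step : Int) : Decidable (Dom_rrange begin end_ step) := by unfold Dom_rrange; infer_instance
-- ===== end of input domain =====

-- B replaces A's one-element-per-call recursion by a closed-form element count and a single
-- list comprehension (objective: simpler / non-recursive).

-- ===== PORT A =====
-- literal transliteration of A's recursion; 'abs x < abs y' on ints is ported as natAbs comparison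
def rrange (begin : Int) (end_ : Int) (step : Int) : List Int :=
  if begin = end_ then []
  else if begin < end_ ∧ step < 0 then []
  else if begin > end_ ∧ step > 0 then []
  else
    begin ::
      (if _h : (begin + step - end_).natAbs < (begin - end_).natAbs then
         rrange (begin + step) end_ step
       else [])
termination_by (begin - end_).natAbs

-- ===== PORT B =====
def rrange_alt (begin : Int) (end_ : Int) (step : Int) : List Int :=
  if begin = end_ then []
  else if step = 0 then [begin]
  else if (decide (end_ > begin)) ≠ (decide (step > 0)) then []
  else
    let n : Int := -(PySem.Int.floordiv (begin - end_) step)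
    (List.range n.toNat).map (fun k : Nat => begin + (k : Int) * step)

-- ===== PRECONDITION & SPEC =====
-- the closed-form number of elements the range has (0 on the guard cases, 1 for step = 0)
def pvCount (begin : Int) (end_ : Int) (step : Int) : Int :=
  if begin = end_ then 0
  else if step = 0 then 1
  else if (decide (end_ > begin)) ≠ (decide (step > 0)) then 0
  else -(PySem.Int.floordiv (begin - end_) step)

-- Pre_ excludes inputs producing more than 996 elements: there A's one-frame-per-element
-- recursion hits CPython's default recursion limit of 1000 and raises RecursionError.
def Pre_rrange (begin : Int) (end_ : Int) (step : Int) : Prop := pvCount begin end_ step ≤ 996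
instance (begin : Int) (end_ : Int) (step : Int) : Decidable (Pre_rrange begin end_ step) := by unfold Pre_rrange; infer_instance
def pvWitness_rrange : Int × Int × Int := (0, 10, 2)

def Spec_rrange (begin : Int) (end_ : Int) (step : Int) (out : List Int) : Prop := out = rrange_alt begin end_ step
instance (begin : Int) (end_ : Int) (step : Int) (out : List Int) : Decidable (Spec_rrange begin end_ step out) := by unfold Spec_rrange; infer_instance

-- ===== CLAIM (what is proved, stated in full; the proofs are below) =====
def Claim_equal_rrange : Prop := ∀ (begin : Int) (end_ : Int) (step : Int), Dom_rrange begin end_ step → Pre_rrange begin end_ step → Spec_rrange begin end_ step (rrange begin end_ step)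

-- ===== LEMMAS AND PROOFS =====

-- floor division is invariant under negating both arguments (restated for rewriting left-to-right)
theorem fdiv_flip (x s : Int) : PySem.Int.floordiv x s = PySem.Int.floordiv (-x) (-s) := by
  rw [← PySem.Int.floordiv_neg_neg (-x) (-s)]; norm_num

-- subtracting one divisor from the dividend lowers the floor quotient by one
theorem fdiv_sub_divisor (x s : Int) (hs : s ≠ 0) :
    PySem.Int.floordiv (x - s) s = PySem.Int.floordiv x s - 1 := by
  rcases lt_or_gt_of_ne hs with hneg | hpos
  · rw [fdiv_flip (x - s) s, fdiv_flip x s]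
    have hpos' : 0 < -s := by omega
    set q := PySem.Int.floordiv (-x) (-s) with hq
    have hqb : q * (-s) ≤ -x ∧ -x < (q + 1) * (-s) :=
      (PySem.Int.floordiv_eq_iff_of_pos (a := -x) (b := -s) (q := q) hpos').mp rfl
    have harg : -(x - s) = -x + s := by ring
    rw [harg, PySem.Int.floordiv_eq_iff_of_pos (a := -x + s) (b := -s) (q := q - 1) hpos']
    constructor <;> nlinarith [hqb.1, hqb.2]
  · set q := PySem.Int.floordiv x s with hq
    have hqb : q * s ≤ x ∧ x < (q + 1) * s :=
      (PySem.Int.floordiv_eq_iff_of_pos (a := x) (b := s) (q := q) hpos).mp rfl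
    rw [PySem.Int.floordiv_eq_iff_of_pos (a := x - s) (b := s) (q := q - 1) hpos]
    constructor <;> nlinarith [hqb.1, hqb.2]

-- when the remaining distance is positive but at most one step, the ceiling count is one
theorem fdiv_eq_neg_one_pos (x s : Int) (hs : 0 < s) (h1 : -s ≤ x) (h2 : x < 0) :
    PySem.Int.floordiv x s = -1 := by
  rw [PySem.Int.floordiv_eq_iff_of_pos (q := -1) hs]
  constructor <;> nlinarith

theorem fdiv_eq_neg_one_neg (x s : Int) (hs : s < 0) (h1 : -s ≥ x) (h2 : x > 0) :
    PySem.Int.floordiv x s = -1 := by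
  rw [fdiv_flip]
  exact fdiv_eq_neg_one_pos (-x) (-s) (by omega) (by omega) (by omega)

-- the floor quotient of (cur - end) by step is negative while cur is strictly before end
theorem fdiv_le_neg_one (x s : Int) (hs : s ≠ 0)
    (hdir : (decide (0 > x)) = (decide (s > 0))) (hx : x ≠ 0) :
    PySem.Int.floordiv x s ≤ -1 := by
  rcases lt_or_gt_of_ne hs with hneg | hpos
  · have hxpos : 0 < x := by
      have : ¬ 0 > x := by simpa [show ¬ s > 0 by omega] using hdir
      omega
    rw [fdiv_flip]
    have := (PySem.Int.floordiv_eq_iff_of_pos (a := -x) (b := -s)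
      (q := PySem.Int.floordiv (-x) (-s)) (by omega)).mp rfl
    nlinarith [this.1, this.2]
  · have hxneg : x < 0 := by
      have : 0 > x := by simpa [hpos] using hdir
      omega
    have := (PySem.Int.floordiv_eq_iff_of_pos (a := x) (b := s)
      (q := PySem.Int.floordiv x s) hpos).mp rfl
    nlinarith [this.1, this.2]

-- shifting the range comprehension by one step
theorem range_map_shift (b s : Int) (m : Nat) :
    (List.range (m + 1)).map (fun k : Nat => b + (k : Int) * s) =
      b :: (List.range m).map (fun k : Nat => (b + s) + (k : Int) * s) := by
  rw [List.range_succ_eq_map, List.map_cons, List.map_map]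
  congr 1
  · norm_num
  · refine List.map_congr_left ?_
    intro k _
    simp only [Function.comp_apply, Nat.cast_succ]
    ring

-- B returns a singleton when the very next value already reaches or passes end
theorem alt_one (b e s : Int) (hs0 : s ≠ 0) (hbe : b ≠ e)
    (hdir : (decide (e > b)) = (decide (s > 0)))
    (hp : 0 < s → e ≤ b + s) (hn : s < 0 → b + s ≤ e) :
    rrange_alt b e s = [b] := by
  unfold rrange_alt
  rw [if_neg hbe, if_neg hs0, if_neg (by simp [hdir])]
  have hcount : PySem.Int.floordiv (b - e) s = -1 := by
    rcases lt_or_gt_of_ne hs0 with h | h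
    · have hb : b > e := by
        have : ¬ e > b := by simpa [show ¬ s > 0 by omega] using hdir
        omega
      exact fdiv_eq_neg_one_neg (b - e) s h (by have := hn h; omega) (by omega)
    · have hb : b < e := by
        have : e > b := by simpa [h] using hdir
        omega
      exact fdiv_eq_neg_one_pos (b - e) s h (by have := hp h; omega) (by omega)
  rw [hcount]
  norm_num [List.range_one]

-- B satisfies A's recurrence in the "still strictly approaching" case
theorem alt_cons (b e s : Int) (hs : s ≠ 0)
    (hdir : (decide (e > b)) = (decide (s > 0)))
    (hmid : (decide (e > b + s)) = (decide (s > 0)))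
    (hne : b ≠ e) (hne' : b + s ≠ e) :
    rrange_alt b e s = b :: rrange_alt (b + s) e s := by
  unfold rrange_alt
  rw [if_neg hne, if_neg hs, if_neg (by simp [hdir]), if_neg hne', if_neg hs,
      if_neg (by simp [hmid])]
  have hstep : PySem.Int.floordiv (b - e) s = PySem.Int.floordiv (b + s - e) s - 1 := by
    have h := fdiv_sub_divisor (b + s - e) s hs
    have harg : b + s - e - s = b - e := by ring
    rw [harg] at h
    omega
  have hq : PySem.Int.floordiv (b + s - e) s ≤ -1 := by
    refine fdiv_le_neg_one (b + s - e) s hs ?_ (by omega)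
    simpa [gt_iff_lt, sub_neg] using hmid
  rw [hstep]
  have hnat : (-(PySem.Int.floordiv (b + s - e) s - 1)).toNat
      = (-(PySem.Int.floordiv (b + s - e) s)).toNat + 1 := by omega
  simp only []
  rw [hnat, range_map_shift]

theorem rrange_eq_alt_bounded :
    ∀ (n : Nat) (b e s : Int), (b - e).natAbs < n → rrange b e s = rrange_alt b e s := by
  intro n
  induction n with
  | zero => intro b e s h; omega
  | succ n ih =>
    intro b e s hlt
    rw [rrange]
    by_cases hbe : b = e
    · simp [hbe, rrange_alt]
    by_cases hs0 : s = 0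
    · subst hs0
      rw [if_neg hbe, if_neg (by omega), if_neg (by omega)]
      rw [dif_neg (by simp)]
      unfold rrange_alt
      rw [if_neg hbe, if_pos rfl]
    by_cases hd1 : b < e ∧ s < 0
    · rw [if_neg hbe, if_pos hd1]
      unfold rrange_alt
      rw [if_neg hbe, if_neg hs0,
          if_pos (by simp [show e > b from hd1.1, show ¬ s > 0 by omega])]
    by_cases hd2 : b > e ∧ s > 0
    · rw [if_neg hbe, if_neg hd1, if_pos hd2]
      unfold rrange_alt
      rw [if_neg hbe, if_neg hs0,
          if_pos (by simp [show ¬ e > b by omega, hd2.2])]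
    -- now b ≠ e, s ≠ 0 and the direction matches
    rw [if_neg hbe, if_neg hd1, if_neg hd2]
    have hdir : (decide (e > b)) = (decide (s > 0)) := by
      rcases lt_or_gt_of_ne hs0 with h | h <;> rcases lt_or_gt_of_ne hbe with h' | h' <;>
        simp_all <;> omega
    by_cases hstop : (b + s - e).natAbs < (b - e).natAbs
    · rw [dif_pos hstop]
      by_cases hne' : b + s = e
      · rw [rrange, if_pos hne']
        exact (alt_one b e s hs0 hbe hdir (fun _ => by omega) (fun _ => by omega)).symm
      by_cases hmid : (decide (e > b + s)) = (decide (s > 0))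
      · rw [ih (b + s) e s (by omega)]
        exact (alt_cons b e s hs0 hdir hmid hbe hne').symm
      · rcases lt_or_gt_of_ne hs0 with h | h
        · have hgt : b + s < e := by
            by_contra hc
            exact hmid (by simp [show ¬ e > b + s from hc, show ¬ s > 0 by omega])
          rw [rrange, if_neg hne', if_pos ⟨hgt, h⟩]
          exact (alt_one b e s hs0 hbe hdir (fun h' => by omega) (fun _ => by omega)).symm
        · have hgt : b + s > e := by
            by_contra hc
            exact hmid (by simp [show e > b + s by omega, h])
          rw [rrange, if_neg hne', if_neg (by omega), if_pos ⟨hgt, h⟩]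
          exact (alt_one b e s hs0 hbe hdir (fun _ => by omega) (fun h' => by omega)).symm
    · rw [dif_neg hstop]
      rcases lt_or_gt_of_ne hs0 with h | h
      · have hb : b > e := by
          have : ¬ e > b := by simpa [show ¬ s > 0 by omega] using hdir
          omega
        exact (alt_one b e s hs0 hbe hdir (fun h' => by omega) (fun _ => by omega)).symm
      · have hb : b < e := by
          have : e > b := by simpa [h] using hdir
          omega
        exact (alt_one b e s hs0 hbe hdir (fun _ => by omega) (fun h' => by omega)).symm

-- ===== VERDICT (by name: the statement is the Claim_ definition above) =====
theorem rrange_spec : Claim_equal_rrange := by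
  intro b e s _ _
  unfold Spec_rrange
  exact rrange_eq_alt_bounded ((b - e).natAbs + 1) b e s (by omega)
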